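-- pv_equiv track=rewrite | github.com/abhay-mishra-netizen/mini_project | src/data.py | build_cluster_map
-- ===== SOURCE A (Python) =====
-- from typing import Dict, List
--
-- def build_cluster_map(num_clients: int, num_clusters: int):
--     if num_clients % num_clusters != 0:
--         raise ValueError("num_clients must be divisible by num_clusters")
--
--     clients_per_cluster = num_clients // num_clusters
--     cluster_map: Dict[int, List[int]] = {}
--
--     start = 0
--     for cluster_id in range(num_clusters):
--         end = start + clients_per_cluster
--         cluster_map[cluster_id] = list(range(start, end))
--         start = end
--
--     return cluster_map
-- ===== SOURCE B (Python) =====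
-- def build_cluster_map(num_clients: int, num_clusters: int):
--     if num_clients % num_clusters != 0:
--         raise ValueError("num_clients must be divisible by num_clusters")
--
--     clients_per_cluster = num_clients // num_clusters
--     cluster_map = {cid: [] for cid in range(num_clusters)}
--     for i in range(num_clients):
--         cluster_map[i // clients_per_cluster].append(i)
--     return cluster_map
-- ===== Notes on version B (the rewrite author's own statement) =====
-- stated objective: alternative
-- what changed: B pre-creates every cluster key with an empty list and scatters each client i into cluster i // clients_per_cluster in one pass over clients, instead of A's per-cluster loop slicing contiguous ranges with a running start offset.
-- outside the precondition, e.g. on build_cluster_map(4, -2): A returns {}, B raises KeyError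
import Mathlib
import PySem

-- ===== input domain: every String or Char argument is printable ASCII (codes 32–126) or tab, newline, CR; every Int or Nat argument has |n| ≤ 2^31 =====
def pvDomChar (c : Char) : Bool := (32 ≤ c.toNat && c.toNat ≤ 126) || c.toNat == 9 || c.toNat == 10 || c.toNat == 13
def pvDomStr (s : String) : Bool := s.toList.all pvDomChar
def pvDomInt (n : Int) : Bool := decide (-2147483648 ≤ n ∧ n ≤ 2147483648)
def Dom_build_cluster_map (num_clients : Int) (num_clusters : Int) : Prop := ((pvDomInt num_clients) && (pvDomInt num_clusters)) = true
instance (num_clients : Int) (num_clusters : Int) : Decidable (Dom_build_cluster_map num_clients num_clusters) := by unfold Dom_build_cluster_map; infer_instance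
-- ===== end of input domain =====

-- B pre-creates every cluster key and scatters each client i into cluster i // clients_per_cluster in one
-- pass, instead of A's per-cluster slicing of contiguous ranges with a running start (alternative decomposition).


-- ===== PORT A =====
def build_cluster_map (num_clients : Int) (num_clusters : Int) : List (Int × List Int) :=
  -- 'if num_clients % num_clusters != 0: raise ValueError' and num_clusters == 0 (ZeroDivisionError) are excluded by Pre_
  let clients_per_cluster := PySem.Int.floordiv num_clients num_clusters
  let st := (PySem.List.pyRange 0 num_clusters).foldl
    (fun (acc : Int × PySem.Dict Int (List Int)) cluster_id =>
      -- end = start + clients_per_cluster; cluster_map[cluster_id] = list(range(start, end)); start = end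
      (acc.1 + clients_per_cluster,
       acc.2.insert cluster_id (PySem.List.pyRange acc.1 (acc.1 + clients_per_cluster))))
    (0, PySem.Dict.empty)
  st.2.items

-- ===== PORT B =====
def build_cluster_map_alt (num_clients : Int) (num_clusters : Int) : List (Int × List Int) :=
  let clients_per_cluster := PySem.Int.floordiv num_clients num_clusters
  -- cluster_map = {cid: [] for cid in range(num_clusters)}
  let d0 : PySem.Dict Int (List Int) :=
    (PySem.List.pyRange 0 num_clusters).foldl (fun d cid => d.insert cid []) PySem.Dict.empty
  -- for i in range(num_clients): cluster_map[i // clients_per_cluster].append(i)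
  let d := (PySem.List.pyRange 0 num_clients).foldl
    (fun d i => d.modify (PySem.Int.floordiv i clients_per_cluster) [] (· ++ [i])) d0
  d.items

-- ===== PRECONDITION & SPEC =====
-- Pre_ excludes: num_clusters = 0 (A raises ZeroDivisionError), non-divisible pairs (A raises ValueError),
-- and positive num_clients with negative num_clusters, where A's empty dict is an artefact of its
-- range() loop over a negative cluster count and B's scatter loop naturally raises KeyError.
def Pre_build_cluster_map (num_clients : Int) (num_clusters : Int) : Prop :=
  num_clusters ≠ 0 ∧ PySem.Int.mod num_clients num_clusters = 0 ∧
    ¬(0 < num_clients ∧ num_clusters < 0)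
instance (num_clients : Int) (num_clusters : Int) : Decidable (Pre_build_cluster_map num_clients num_clusters) := by
  unfold Pre_build_cluster_map; infer_instance
def pvWitness_build_cluster_map : Int × Int := (6, 3)
def Spec_build_cluster_map (num_clients : Int) (num_clusters : Int) (out : List (Int × List Int)) : Prop := out = build_cluster_map_alt num_clients num_clusters
instance (num_clients : Int) (num_clusters : Int) (out : List (Int × List Int)) : Decidable (Spec_build_cluster_map num_clients num_clusters out) := by unfold Spec_build_cluster_map; infer_instance

-- ===== CLAIM (what is proved, stated in full; the proofs are below) =====
def Claim_equal_build_cluster_map : Prop := ∀ (num_clients : Int) (num_clusters : Int), Dom_build_cluster_map num_clients num_clusters → Pre_build_cluster_map num_clients num_clusters → Spec_build_cluster_map num_clients num_clusters (build_cluster_map num_clients num_clusters)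

-- ===== LEMMAS AND PROOFS =====

-- A's loop over the fresh keys of range(j, e), started at offset s, appends the contiguous slices.
theorem pvA_fold (cpc : Int) (m : Nat) : ∀ (j e s : Int) (d : PySem.Dict Int (List Int)),
    e - j = m →
    (∀ c : Int, j ≤ c → d.contains c = false) →
    ((PySem.List.pyRange j e).foldl
      (fun (acc : Int × PySem.Dict Int (List Int)) cluster_id =>
        (acc.1 + cpc, acc.2.insert cluster_id (PySem.List.pyRange acc.1 (acc.1 + cpc))))
      (s, d)).2.items
    = d.items ++ (PySem.List.pyRange j e).map
        (fun c => (c, PySem.List.pyRange (s + (c - j) * cpc) (s + (c - j) * cpc + cpc))) := by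
  induction m with
  | zero =>
    intro j e s d he _
    rw [PySem.List.pyRange_one_eq_nil (by omega)]
    simp
  | succ m ih =>
    intro j e s d he hfresh
    rw [PySem.List.pyRange_one_cons (by omega)]
    simp only [List.foldl_cons, List.map_cons]
    rw [ih (j + 1) e (s + cpc) _ (by omega) (by
      intro c hc
      rw [PySem.Dict.contains_insert]
      have hne : (c == j) = false := by simp; omega
      rw [hne]
      exact hfresh c (by omega))]
    rw [PySem.Dict.items_insert_of_not_contains _ _ (hfresh j le_rfl)]
    simp only [List.append_assoc, List.singleton_append, sub_self, zero_mul, add_zero]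
    congr 2
    refine List.map_congr_left ?_
    intro c hc
    have e2 : s + cpc + (c - (j + 1)) * cpc = s + (c - j) * cpc := by ring
    rw [e2]

-- the initial dict of B: every cluster key, each bound to []
theorem pvB_init (k : Int) :
    ((PySem.List.pyRange 0 k).foldl (fun (d : PySem.Dict Int (List Int)) cid => d.insert cid []) PySem.Dict.empty).items
    = (PySem.List.pyRange 0 k).map (fun c => (c, ([] : List Int))) := by
  have h := PySem.Dict.items_foldl_insert_fresh (PySem.List.pyRange 0 k) (fun c => c)
      (fun _ => ([] : List Int)) PySem.Dict.empty
      (by intro a _; simp [PySem.Dict.contains_empty])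
      (by simpa using PySem.List.nodup_pyRange_one 0 k)
  simpa using h

-- the clients landing in cluster c are exactly the contiguous slice, when n = k * cpc
theorem pvFilter_slice (n k cpc c : Int) (hk : 0 < k) (hn : n = k * cpc)
    (hc0 : 0 ≤ c) (hck : c < k) :
    (PySem.List.pyRange 0 n).filter (fun i => PySem.Int.floordiv i cpc == c)
    = PySem.List.pyRange (c * cpc) (c * cpc + cpc) := by
  by_cases hcpc : 0 < cpc
  · have h1 : (0:Int) ≤ c * cpc := mul_nonneg hc0 hcpc.le
    have h2 : c * cpc + cpc ≤ n := by
      have : (c + 1) * cpc ≤ k * cpc := by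
        apply mul_le_mul_of_nonneg_right (by omega) hcpc.le
      nlinarith
    rw [PySem.List.pyRange_one_append 0 (c * cpc) n h1 (by nlinarith),
        PySem.List.pyRange_one_append (c * cpc) (c * cpc + cpc) n (by nlinarith) h2,
        List.filter_append, List.filter_append]
    rw [List.filter_eq_nil_iff.mpr (by
      intro i hi
      have h := PySem.List.mem_pyRange_one.mp hi
      have : PySem.Int.floordiv i cpc < c := (PySem.Int.floordiv_lt_iff_lt_mul hcpc).mpr h.2
      simp; omega)]
    rw [List.filter_eq_self.mpr (by
      intro i hi
      have h := PySem.List.mem_pyRange_one.mp hi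
      have : PySem.Int.floordiv i cpc = c := by
        rw [PySem.Int.floordiv_eq_iff_of_pos hcpc]
        constructor
        · exact h.1
        · nlinarith [h.2]
      simp [this])]
    rw [List.filter_eq_nil_iff.mpr (by
      intro i hi
      have h := PySem.List.mem_pyRange_one.mp hi
      have : c + 1 ≤ PySem.Int.floordiv i cpc := by
        rw [PySem.Int.le_floordiv_iff_mul_le hcpc]
        nlinarith [h.1]
      simp; omega)]
    simp
  · have hn0 : n ≤ 0 := by nlinarith [le_of_not_gt hcpc]
    rw [PySem.List.pyRange_one_eq_nil hn0, PySem.List.pyRange_one_eq_nil (by omega)]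
    simp

-- B's whole computation, for 0 < k, k * cpc = n: the same map over range(k)
theorem pvB_items (n k cpc : Int) (hk : 0 < k) (hn : n = k * cpc) :
    (((PySem.List.pyRange 0 n).foldl
        (fun (d : PySem.Dict Int (List Int)) i =>
          d.modify (PySem.Int.floordiv i cpc) [] (· ++ [i]))
        ((PySem.List.pyRange 0 k).foldl (fun (d : PySem.Dict Int (List Int)) cid => d.insert cid []) PySem.Dict.empty)).items)
    = (PySem.List.pyRange 0 k).map
        (fun c => (c, PySem.List.pyRange (c * cpc) (c * cpc + cpc))) := by
  set d0 : PySem.Dict Int (List Int) :=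
    (PySem.List.pyRange 0 k).foldl (fun d cid => d.insert cid []) PySem.Dict.empty with hd0
  have hd0items : d0.items = (PySem.List.pyRange 0 k).map (fun c => (c, ([] : List Int))) :=
    pvB_init k
  have hd0keys : d0.keys = PySem.List.pyRange 0 k := by
    simp [PySem.Dict.keys, hd0items, List.map_map, Function.comp_def]
  have hd0nodup : d0.keys.Nodup := by
    rw [hd0keys]; exact PySem.List.nodup_pyRange_one 0 k
  by_cases hnpos : 0 < n
  · have hcpc : 0 < cpc := by nlinarith
    -- final keys are unchanged: every scattered key already exists
    have hkeys : ((PySem.List.pyRange 0 n).foldl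
        (fun (d : PySem.Dict Int (List Int)) i =>
          d.modify (PySem.Int.floordiv i cpc) [] (· ++ [i])) d0).keys
        = PySem.List.pyRange 0 k := by
      rw [PySem.Dict.keys_foldl_modify_key]
      rw [PySem.Set.update_eq_append_filter]
      rw [List.filter_eq_nil_iff.mpr (by
        intro y hy
        have hy' : y ∈ (PySem.List.pyRange 0 n).map (fun i => PySem.Int.floordiv i cpc) :=
          (PySem.Set.mem_ofList _ _).mp hy
        obtain ⟨i, hi, rfl⟩ := List.mem_map.mp hy'
        have hib := PySem.List.mem_pyRange_one.mp hi
        have hylo : 0 ≤ PySem.Int.floordiv i cpc :=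
          (PySem.Int.le_floordiv_iff_mul_le hcpc).mpr (by nlinarith [hib.1])
        have hyhi : PySem.Int.floordiv i cpc < k :=
          (PySem.Int.floordiv_lt_iff_lt_mul hcpc).mpr (by nlinarith [hib.2])
        simp only [Bool.not_eq_true', Bool.not_eq_false]
        simp only [PySem.Set.contains_eq_listContains]
        rw [hd0keys]
        simp only [List.contains_eq_mem, decide_eq_true_eq]
        exact PySem.List.mem_pyRange_one.mpr ⟨hylo, hyhi⟩)]
      rw [hd0keys]
      simp
    have hnodup : ((PySem.List.pyRange 0 n).foldl
        (fun (d : PySem.Dict Int (List Int)) i =>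
          d.modify (PySem.Int.floordiv i cpc) [] (· ++ [i])) d0).keys.Nodup :=
      PySem.Dict.nodup_keys_foldl_modify_key _ (fun i => PySem.Int.floordiv i cpc) []
        (fun _ i => (· ++ [i])) d0 hd0nodup
    rw [PySem.Dict.items_eq_map_keys _ hnodup []]
    rw [hkeys]
    refine List.map_congr_left ?_
    intro c hc
    have hcb := PySem.List.mem_pyRange_one.mp hc
    -- rewrite the scatter loop as a fold over (key, value) pairs
    have hfold : (PySem.List.pyRange 0 n).foldl
        (fun (d : PySem.Dict Int (List Int)) i =>
          d.modify (PySem.Int.floordiv i cpc) [] (· ++ [i])) d0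
        = ((PySem.List.pyRange 0 n).map (fun i => (PySem.Int.floordiv i cpc, i))).foldl
            (fun (d : PySem.Dict Int (List Int)) p => d.modify p.1 [] (· ++ [p.2])) d0 := by
      rw [List.foldl_map]
    rw [hfold, PySem.Dict.getD_foldl_modify_append]
    rw [List.filter_map, List.map_map]
    have hgd0 : d0.getD c [] = [] := by
      refine PySem.Dict.getD_of_mem_items d0 ?_ hd0nodup []
      rw [hd0items]
      exact List.mem_map.mpr ⟨c, hc, rfl⟩
    rw [hgd0]
    have h1 : ((fun (x : Int × Int) => x.2) ∘ (fun i => (PySem.Int.floordiv i cpc, i)))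
        = fun i : Int => i := rfl
    have h2 : ((fun (p : Int × Int) => p.1 == c) ∘ (fun i => (PySem.Int.floordiv i cpc, i)))
        = fun i => PySem.Int.floordiv i cpc == c := rfl
    rw [h1, h2, List.map_id', pvFilter_slice n k cpc c hk hn hcb.1 hcb.2]
    simp
  · -- no clients: the scatter loop runs zero times and every slice is empty
    have hcpc : cpc ≤ 0 := by nlinarith [le_of_not_gt hnpos]
    rw [PySem.List.pyRange_one_eq_nil (le_of_not_gt hnpos)]
    simp only [List.foldl_nil]
    rw [hd0items]
    refine List.map_congr_left ?_
    intro c _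
    rw [PySem.List.pyRange_one_eq_nil (by omega)]

-- ===== VERDICT (by name: the statement is the Claim_ definition above) =====
theorem build_cluster_map_spec : Claim_equal_build_cluster_map := by
  intro n k _hdom hpre
  obtain ⟨hk0, hmod, hns⟩ := hpre
  unfold Spec_build_cluster_map build_cluster_map build_cluster_map_alt
  by_cases hk : 0 < k
  · have hdvd : k ∣ n := (PySem.Int.mod_eq_zero_iff_dvd n k).mp hmod
    obtain ⟨c, hc⟩ := hdvd
    have hcpc : PySem.Int.floordiv n k = c := by
      rw [PySem.Int.floordiv_eq_ediv_of_pos hk, hc]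
      exact Int.mul_ediv_cancel_left c (by omega)
    simp only [hcpc]
    rw [pvA_fold c k.toNat 0 k 0 PySem.Dict.empty (by omega)
        (by intro x _; simp [PySem.Dict.contains_empty])]
    rw [pvB_items n k c hk hc]
    have hie : (PySem.Dict.empty : PySem.Dict Int (List Int)).items = [] := rfl
    rw [hie, List.nil_append]
    refine List.map_congr_left ?_
    intro x _
    have e1 : 0 + (x - 0) * c = x * c := by ring
    rw [e1]
  · have hkneg : k < 0 := by omega
    have hn0 : n ≤ 0 := by
      by_contra h
      exact hns ⟨by omega, hkneg⟩
    rw [PySem.List.pyRange_one_eq_nil (by omega), PySem.List.pyRange_one_eq_nil hn0]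
    simp
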